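-- pv_equiv track=rewrite | github.com/miliar/Code_Jam_Webscraper | solutions_python/Problem_138/1835.py | decietwar
-- ===== SOURCE A (Python) =====
-- def decietwar(Naomi,Ken,Blocks):
--     Cnt_N = 0
--
--     for i in range(0,Blocks):
--
--         if(max(Naomi)>max(Ken)):
--             Cnt_N += 1
--             Naomi.remove(max(Naomi))
--             Ken.remove(max(Ken))
--         else:
--             Naomi.remove(min(Naomi))
--             Ken.remove(max(Ken))
--
--     return Cnt_N
-- ===== SOURCE B (Python) =====
-- def decietwar(Naomi, Ken, Blocks):
--     n = sorted(Naomi)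
--     k = sorted(Ken)
--     wins = 0
--     for _ in range(Blocks):
--         if n[-1] > k[-1]:
--             wins += 1
--             n.pop()
--         k.pop()
--     return wins
-- ===== Notes on version B (the rewrite author's own statement) =====
-- stated objective: faster
-- what changed: Instead of rescanning the lists with max()/min() and remove() every round, B sorts both lists once and plays each round with O(1) end accesses and pops (removing Naomi's min never affects her max, so only the top pointer matters).
import Mathlib
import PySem

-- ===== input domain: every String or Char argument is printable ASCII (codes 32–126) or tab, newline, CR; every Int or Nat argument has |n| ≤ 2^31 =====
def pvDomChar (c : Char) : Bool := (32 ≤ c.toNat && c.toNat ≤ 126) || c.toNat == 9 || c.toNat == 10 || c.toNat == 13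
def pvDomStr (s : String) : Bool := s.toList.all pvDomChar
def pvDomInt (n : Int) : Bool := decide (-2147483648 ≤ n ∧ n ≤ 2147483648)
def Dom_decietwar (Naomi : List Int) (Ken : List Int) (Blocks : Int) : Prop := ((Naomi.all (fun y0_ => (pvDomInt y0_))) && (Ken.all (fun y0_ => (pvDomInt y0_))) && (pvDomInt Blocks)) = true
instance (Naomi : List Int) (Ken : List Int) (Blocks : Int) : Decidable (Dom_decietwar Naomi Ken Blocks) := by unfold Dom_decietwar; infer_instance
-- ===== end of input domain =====

-- B replaces A's per-round max()/min()/remove() scans by sorting once and popping ends (asymptotically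
-- faster); equivalence is about the RETURN value only: A mutates its list arguments in place, B does not.

-- ===== PORT A =====
-- one round of A's loop, Option = a raised ValueError (max/min of an empty list)
def decietwarLoopA : List Int → List Int → Int → Nat → Option Int
  | _, _, cnt, 0 => some cnt
  | N, K, cnt, f+1 =>
    match PySem.List.max? N (fun y => y), PySem.List.max? K (fun y => y) with
    | some mN, some mK =>
      if mN > mK then
        match PySem.List.remove? N mN, PySem.List.remove? K mK with
        | some N', some K' => decietwarLoopA N' K' (cnt + 1) f
        | _, _ => none
      else
        match PySem.List.min? N (fun y => y) with
        | some mn =>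
          match PySem.List.remove? N mn, PySem.List.remove? K mK with
          | some N', some K' => decietwarLoopA N' K' cnt f
          | _, _ => none
        | none => none
    | _, _ => none

def decietwar (Naomi : List Int) (Ken : List Int) (Blocks : Int) : Int :=
  (decietwarLoopA Naomi Ken 0 Blocks.toNat).getD 0

-- ===== PORT B =====
-- one round of B's loop: n[-1] / k[-1] and pop() from the end (Option = IndexError)
def decietwarLoopB : List Int → List Int → Int → Nat → Option Int
  | _, _, wins, 0 => some wins
  | n, k, wins, f+1 =>
    match PySem.List.pyGet? n (-1), PySem.List.pyGet? k (-1) with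
    | some a, some b =>
      if a > b then decietwarLoopB n.dropLast k.dropLast (wins + 1) f
      else decietwarLoopB n k.dropLast wins f
    | _, _ => none

def decietwar_alt (Naomi : List Int) (Ken : List Int) (Blocks : Int) : Int :=
  (decietwarLoopB (PySem.List.sorted Naomi (fun y => y)) (PySem.List.sorted Ken (fun y => y)) 0 Blocks.toNat).getD 0

-- ===== PRECONDITION & SPEC =====
-- Pre_ excludes exactly the inputs where A raises ValueError: more rounds than elements in a list
def Pre_decietwar (Naomi : List Int) (Ken : List Int) (Blocks : Int) : Prop :=
  Blocks ≤ (Naomi.length : Int) ∧ Blocks ≤ (Ken.length : Int)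
instance (Naomi : List Int) (Ken : List Int) (Blocks : Int) : Decidable (Pre_decietwar Naomi Ken Blocks) := by unfold Pre_decietwar; infer_instance

def pvWitness_decietwar : List Int × List Int × Int := ([3, 1], [2, 2], 2)

def Spec_decietwar (Naomi : List Int) (Ken : List Int) (Blocks : Int) (out : Int) : Prop := out = decietwar_alt Naomi Ken Blocks
instance (Naomi : List Int) (Ken : List Int) (Blocks : Int) (out : Int) : Decidable (Spec_decietwar Naomi Ken Blocks out) := by unfold Spec_decietwar; infer_instance

-- ===== CLAIM (what is proved, stated in full; the proofs are below) =====
def Claim_equal_decietwar : Prop := ∀ (Naomi : List Int) (Ken : List Int) (Blocks : Int), Dom_decietwar Naomi Ken Blocks → Pre_decietwar Naomi Ken Blocks → Spec_decietwar Naomi Ken Blocks (decietwar Naomi Ken Blocks)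

-- ===== LEMMAS AND PROOFS =====

-- intermediate loop: A's rounds replayed on the sorted lists (max = last, min = head)
def decietwarLoopS : List Int → List Int → Int → Nat → Option Int
  | _, _, cnt, 0 => some cnt
  | s, t, cnt, f+1 =>
    match s.getLast?, t.getLast? with
    | some a, some b =>
      if a > b then decietwarLoopS s.dropLast t.dropLast (cnt + 1) f
      else decietwarLoopS s.tail t.dropLast cnt f
    | _, _ => none

theorem le_getLast_of_sorted {s : List Int} (hs : s.Pairwise (· ≤ ·)) (h : s ≠ [])
    {x : Int} (hx : x ∈ s) : x ≤ s.getLast h := by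
  induction s with
  | nil => exact absurd rfl h
  | cons a l ih =>
    rcases List.mem_cons.1 hx with rfl | hx'
    · cases l with
      | nil => simp [List.getLast]
      | cons b l' =>
        have : x ≤ (b :: l').getLast (by simp) :=
          (List.pairwise_cons.1 hs).1 _ (List.getLast_mem _)
        simpa [List.getLast] using this
    · have hl : l ≠ [] := List.ne_nil_of_mem hx'
      have := ih (List.pairwise_cons.1 hs).2 hl hx'
      cases l with
      | nil => exact absurd rfl hl
      | cons b l' => simpa [List.getLast] using this

theorem max?_eq_getLast? {N s : List Int} (hp : N.Perm s) (hs : s.Pairwise (· ≤ ·)) :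
    PySem.List.max? N (fun y => y) = s.getLast? := by
  rcases eq_or_ne N [] with rfl | hNe
  · have hsnil : s = [] := (List.Perm.nil_eq hp).symm
    rw [(PySem.List.max?_eq_none_iff _ _).2 rfl, hsnil, List.getLast?_nil]
  · have hse : s ≠ [] := fun h => hNe (List.Perm.eq_nil (h ▸ hp))
    obtain ⟨m, hm⟩ : ∃ m, PySem.List.max? N (fun y => y) = some m := by
      cases h : PySem.List.max? N (fun y => y) with
      | none => exact absurd ((PySem.List.max?_eq_none_iff _ _).1 h) hNe
      | some m => exact ⟨m, rfl⟩
    have hmem : m ∈ N := PySem.List.max?_mem hm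
    have hmax : ∀ y ∈ N, y ≤ m := fun y hy => PySem.List.max?_isMax hm y hy
    have h1 : s.getLast hse ≤ m := hmax _ (hp.mem_iff.2 (List.getLast_mem hse))
    have h2 : m ≤ s.getLast hse := le_getLast_of_sorted hs hse (hp.mem_iff.1 hmem)
    rw [hm, List.getLast?_eq_some_getLast hse, le_antisymm h2 h1]

theorem min?_eq_head? {N s : List Int} (hp : N.Perm s) (hs : s.Pairwise (· ≤ ·)) :
    PySem.List.min? N (fun y => y) = s.head? := by
  rcases eq_or_ne N [] with rfl | hNe
  · have hsnil : s = [] := (List.Perm.nil_eq hp).symm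
    rw [(PySem.List.min?_eq_none_iff _ _).2 rfl, hsnil, List.head?_nil]
  · have hse : s ≠ [] := fun h => hNe (List.Perm.eq_nil (h ▸ hp))
    obtain ⟨c, t, rfl⟩ := List.exists_cons_of_ne_nil hse
    obtain ⟨m, hm⟩ : ∃ m, PySem.List.min? N (fun y => y) = some m := by
      cases h : PySem.List.min? N (fun y => y) with
      | none => exact absurd ((PySem.List.min?_eq_none_iff _ _).1 h) hNe
      | some m => exact ⟨m, rfl⟩
    have hmem : m ∈ N := PySem.List.min?_mem hm
    have hmin : ∀ y ∈ N, m ≤ y := fun y hy => PySem.List.min?_isMin hm y hy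
    have h1 : m ≤ c := hmin _ (hp.mem_iff.2 (by simp))
    have h2 : c ≤ m := by
      have hmct := hp.mem_iff.1 hmem
      rw [List.mem_cons] at hmct
      rcases hmct with rfl | hmt
      · exact le_rfl
      · exact (List.pairwise_cons.1 hs).1 _ hmt
    rw [hm, le_antisymm h2 h1, List.head?_cons]

theorem erase_getLast_perm_dropLast {s : List Int} (h : s ≠ []) :
    (s.erase (s.getLast h)).Perm s.dropLast := by
  set m := s.getLast h with hm
  have hsplit : s = s.dropLast ++ [m] := (List.dropLast_append_getLast h).symm
  by_cases hmem : m ∈ s.dropLast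
  · have h1 : s.erase m = s.dropLast.erase m ++ [m] := by
      conv_lhs => rw [hsplit]
      exact List.erase_append_left _ hmem
    rw [h1]
    exact List.perm_append_comm.trans (List.perm_cons_erase hmem).symm
  · have h1 : s.erase m = s.dropLast ++ [m].erase m := by
      conv_lhs => rw [hsplit]
      exact List.erase_append_right _ hmem
    rw [h1]
    simp

theorem loopA_eq_loopS : ∀ (f : Nat) (N s K t : List Int) (cnt : Int),
    N.Perm s → s.Pairwise (· ≤ ·) → K.Perm t → t.Pairwise (· ≤ ·) →
    decietwarLoopA N K cnt f = decietwarLoopS s t cnt f := by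
  intro f
  induction f with
  | zero => intros; rfl
  | succ f ih =>
    intro N s K t cnt hpN hsN hpK hsK
    rw [decietwarLoopA, decietwarLoopS,
        max?_eq_getLast? hpN hsN, max?_eq_getLast? hpK hsK]
    cases hgs : s.getLast? with
    | none => rfl
    | some a =>
      cases hgt : t.getLast? with
      | none => rfl
      | some b =>
      have hse : s ≠ [] := by intro h; simp [h] at hgs
      have hte : t ≠ [] := by intro h; simp [h] at hgt
      have ha : a = s.getLast hse := by
        rw [List.getLast?_eq_some_getLast hse] at hgs; exact (Option.some.inj hgs).symm
      have hb : b = t.getLast hte := by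
        rw [List.getLast?_eq_some_getLast hte] at hgt; exact (Option.some.inj hgt).symm
      have haN : a ∈ N := hpN.mem_iff.2 (ha ▸ List.getLast_mem hse)
      have hbK : b ∈ K := hpK.mem_iff.2 (hb ▸ List.getLast_mem hte)
      have hremK : PySem.List.remove? K b = some (K.erase b) :=
        PySem.List.remove?_eq_some_erase _ _ hbK
      have hKperm : (K.erase b).Perm t.dropLast :=
        (hpK.erase b).trans (hb ▸ erase_getLast_perm_dropLast hte)
      have hKsort : t.dropLast.Pairwise (· ≤ ·) := hsK.sublist (List.dropLast_sublist _)
      by_cases hab : a > b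
      · simp only [if_pos hab]
        have hremN : PySem.List.remove? N a = some (N.erase a) :=
          PySem.List.remove?_eq_some_erase _ _ haN
        rw [hremN, hremK]
        exact ih _ _ _ _ _
          ((hpN.erase a).trans (ha ▸ erase_getLast_perm_dropLast hse)) (hsN.sublist (List.dropLast_sublist _))
          hKperm hKsort
      · simp only [if_neg hab]
        rw [min?_eq_head? hpN hsN]
        obtain ⟨c, s', rfl⟩ := List.exists_cons_of_ne_nil hse
        simp only [List.head?_cons]
        have hcN : c ∈ N := hpN.mem_iff.2 (by simp)
        rw [PySem.List.remove?_eq_some_erase _ _ hcN, hremK, List.tail_cons]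
        exact ih _ _ _ _ _
          ((hpN.erase c).trans (by rw [List.erase_cons_head]))
          ((List.pairwise_cons.1 hsN).2) hKperm hKsort

theorem loopS_eq_loopB : ∀ (f : Nat) (u p p' t : List Int) (cnt : Int), f ≤ u.length →
    decietwarLoopS (p ++ u) t cnt f = decietwarLoopB (p' ++ u) t cnt f := by
  intro f
  induction f with
  | zero => intros; rfl
  | succ f ih =>
    intro u p p' t cnt hf
    have hu : u ≠ [] := by
      intro h; rw [h] at hf; simp at hf
    rw [decietwarLoopS, decietwarLoopB, PySem.List.pyGet?_neg_one, PySem.List.pyGet?_neg_one,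
        List.getLast?_append_of_ne_nil _ hu, List.getLast?_append_of_ne_nil _ hu, List.getLast?_eq_some_getLast hu]
    cases hgt : t.getLast? with
    | none => rfl
    | some b =>
      by_cases hab : u.getLast hu > b
      · simp only [if_pos hab]
        rw [List.dropLast_append_of_ne_nil hu, List.dropLast_append_of_ne_nil hu]
        exact ih u.dropLast p p' t.dropLast (cnt + 1)
          (by rw [List.length_dropLast]; omega)
      · simp only [if_neg hab]
        cases p with
        | nil =>
          obtain ⟨c, u2, rfl⟩ := List.exists_cons_of_ne_nil hu
          rw [List.nil_append, List.tail_cons]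
          have : p' ++ c :: u2 = (p' ++ [c]) ++ u2 := by simp
          rw [this]
          have := ih u2 [] (p' ++ [c]) t.dropLast cnt (by simp at hf; omega)
          simpa using this
        | cons x ps =>
          rw [List.cons_append, List.tail_cons]
          exact ih u ps p' t.dropLast cnt (by omega)

-- ===== VERDICT (by name: the statement is the Claim_ definition above) =====
theorem decietwar_spec : Claim_equal_decietwar := by
  intro N K B _ hpre
  unfold Spec_decietwar decietwar decietwar_alt
  have hpN : N.Perm (PySem.List.sorted N (fun y => y)) := (PySem.List.sorted_perm _ _ _).symm
  have hpK : K.Perm (PySem.List.sorted K (fun y => y)) := (PySem.List.sorted_perm _ _ _).symm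
  have hsN : (PySem.List.sorted N (fun y => y)).Pairwise (· ≤ ·) := by
    simpa using PySem.List.sorted_pairwise (xs := N) (key := fun y => y)
  have hsK : (PySem.List.sorted K (fun y => y)).Pairwise (· ≤ ·) := by
    simpa using PySem.List.sorted_pairwise (xs := K) (key := fun y => y)
  have hlen : B.toNat ≤ (PySem.List.sorted N (fun y => y)).length := by
    rw [PySem.List.length_sorted]
    have h1 := hpre.1
    omega
  rw [loopA_eq_loopS B.toNat N _ K _ 0 hpN hsN hpK hsK]
  have h2 := loopS_eq_loopB B.toNat (PySem.List.sorted N (fun y => y)) [] []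
    (PySem.List.sorted K (fun y => y)) 0 hlen
  simpa using congrArg (fun o => o.getD 0) h2
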